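-- pv_equiv track=rewrite | github.com/Serialbocks/SupersonicMarioPlugin | assets/extract_assets.py | parse_bcd
-- ===== SOURCE A (Python) =====
-- def parse_bcd(data):
--     ret = 0
--     for c in data:
--         ret *= 10
--         ret += c >> 4
--         ret *= 10
--         ret += c & 15
--     return ret
-- ===== SOURCE B (Python) =====
-- def parse_bcd(data):
--     nibbles = []
--     for c in data:
--         nibbles.append(c >> 4)
--         nibbles.append(c & 15)
--     total = 0
--     weight = 1
--     for d in reversed(nibbles):
--         total += d * weight
--         weight *= 10
--     return total
-- ===== Notes on version B (the rewrite author's own statement) =====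
-- stated objective: alternative
-- what changed: Replaced the single-pass MSB-first Horner accumulation with building the explicit nibble list and then summing digit*weight LSB-first over the reversed list with a running power of ten.
import Mathlib
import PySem

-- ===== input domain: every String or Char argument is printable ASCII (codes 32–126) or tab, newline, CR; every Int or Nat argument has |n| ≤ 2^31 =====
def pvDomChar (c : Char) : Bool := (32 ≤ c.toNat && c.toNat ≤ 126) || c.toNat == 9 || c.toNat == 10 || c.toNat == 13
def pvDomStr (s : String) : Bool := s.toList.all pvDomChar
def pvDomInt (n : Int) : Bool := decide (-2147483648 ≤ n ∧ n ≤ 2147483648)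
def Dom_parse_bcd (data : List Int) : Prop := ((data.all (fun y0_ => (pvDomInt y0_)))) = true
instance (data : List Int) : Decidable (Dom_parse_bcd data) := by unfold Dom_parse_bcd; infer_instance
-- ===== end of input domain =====

-- B builds the explicit nibble list and returns a positional weighted sum instead of A's single-pass Horner accumulation; same O(n) cost, alternative decomposition.


-- ===== PORT A =====
-- ret = 0; for c in data: ret *= 10; ret += c >> 4; ret *= 10; ret += c & 15
def parse_bcd (data : List Int) : Int :=
  data.foldl (fun (ret c : Int) => (ret * 10 + (c >>> (4 : Nat))) * 10 + PySem.Int.band c 15) 0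

-- ===== PORT B =====
-- nibbles = []; for c in data: nibbles.append(c >> 4); nibbles.append(c & 15)
def parse_bcd_nibbles (data : List Int) : List Int :=
  data.foldl (fun (acc : List Int) (c : Int) => acc ++ [c >>> (4 : Nat), PySem.Int.band c 15]) []

-- total = 0; weight = 1; for d in reversed(nibbles): total += d * weight; weight *= 10
def parse_bcd_alt (data : List Int) : Int :=
  let nibbles := parse_bcd_nibbles data
  (nibbles.reverse.foldl
    (fun (tw : Int × Int) (d : Int) => (tw.1 + d * tw.2, tw.2 * 10)) (0, 1)).1

-- ===== PRECONDITION & SPEC =====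
def Spec_parse_bcd (data : List Int) (out : Int) : Prop := out = parse_bcd_alt data
instance (data : List Int) (out : Int) : Decidable (Spec_parse_bcd data out) := by unfold Spec_parse_bcd; infer_instance

-- ===== CLAIM (what is proved, stated in full; the proofs are below) =====
def Claim_equal_parse_bcd : Prop := ∀ (data : List Int), Dom_parse_bcd data → Spec_parse_bcd data (parse_bcd data)

-- ===== LEMMAS AND PROOFS =====

-- Horner evaluation of a digit list (characterisation of A's accumulator)
def parse_bcd_horner (l : List Int) : Int := l.foldl (fun r d => r * 10 + d) 0

theorem parse_bcd_foldl_shift (l : List Int) (a : Int) :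
    l.foldl (fun (ret c : Int) => (ret * 10 + (c >>> (4 : Nat))) * 10 + PySem.Int.band c 15) a
      = a * 100 ^ l.length
        + l.foldl (fun (ret c : Int) => (ret * 10 + (c >>> (4 : Nat))) * 10 + PySem.Int.band c 15) 0 := by
  induction l generalizing a with
  | nil => simp
  | cons c t ih =>
    simp only [List.foldl_cons, List.length_cons]
    rw [ih ((a * 10 + (c >>> (4 : Nat))) * 10 + PySem.Int.band c 15),
        ih ((0 * 10 + (c >>> (4 : Nat))) * 10 + PySem.Int.band c 15)]
    ring

theorem parse_bcd_nibbles_shift (l : List Int) (a : List Int) :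
    l.foldl (fun (acc : List Int) (c : Int) => acc ++ [c >>> (4 : Nat), PySem.Int.band c 15]) a
      = a ++ l.foldl (fun (acc : List Int) (c : Int) => acc ++ [c >>> (4 : Nat), PySem.Int.band c 15]) [] := by
  induction l generalizing a with
  | nil => simp
  | cons c t ih =>
    simp only [List.foldl_cons]
    rw [ih (a ++ [c >>> (4 : Nat), PySem.Int.band c 15]),
        ih ([] ++ [c >>> (4 : Nat), PySem.Int.band c 15])]
    simp

theorem parse_bcd_horner_shift (l : List Int) (a : Int) :
    l.foldl (fun r d => r * 10 + d) a = a * 10 ^ l.length + parse_bcd_horner l := by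
  induction l generalizing a with
  | nil => simp [parse_bcd_horner]
  | cons d t ih =>
    simp only [List.foldl_cons, List.length_cons, parse_bcd_horner]
    rw [ih (a * 10 + d), ih (0 * 10 + d)]
    ring

theorem parse_bcd_nibbles_length (t : List Int) :
    (t.foldl (fun (acc : List Int) (c : Int) => acc ++ [c >>> (4 : Nat), PySem.Int.band c 15]) []).length
      = 2 * t.length := by
  induction t with
  | nil => simp
  | cons c t ih =>
    simp only [List.foldl_cons, List.length_cons]
    rw [parse_bcd_nibbles_shift, List.length_append, ih]
    simp only [List.nil_append, List.length_cons, List.length_nil]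
    omega

-- A is Horner evaluation of the nibble list
theorem parse_bcd_eq_horner (data : List Int) :
    parse_bcd data = parse_bcd_horner (parse_bcd_nibbles data) := by
  induction data with
  | nil => simp [parse_bcd, parse_bcd_nibbles, parse_bcd_horner]
  | cons c t ih =>
    simp only [parse_bcd, parse_bcd_nibbles, List.foldl_cons] at *
    rw [parse_bcd_foldl_shift, parse_bcd_nibbles_shift, ih, List.nil_append]
    have h2 : parse_bcd_horner ([c >>> (4 : Nat), PySem.Int.band c 15]
          ++ t.foldl (fun (acc : List Int) (c : Int) => acc ++ [c >>> (4 : Nat), PySem.Int.band c 15]) [])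
        = ((0 * 10 + (c >>> (4 : Nat))) * 10 + PySem.Int.band c 15)
            * 10 ^ (t.foldl (fun (acc : List Int) (c : Int) => acc ++ [c >>> (4 : Nat), PySem.Int.band c 15]) []).length
          + parse_bcd_horner (t.foldl (fun (acc : List Int) (c : Int) => acc ++ [c >>> (4 : Nat), PySem.Int.band c 15]) []) := by
      unfold parse_bcd_horner
      rw [List.foldl_append, List.foldl_cons, List.foldl_cons, List.foldl_nil,
          parse_bcd_horner_shift]
      rfl
    rw [h2, parse_bcd_nibbles_length, pow_mul]
    norm_num

-- Horner MSB-first equals the LSB-first running-weight sum over the reversed list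
theorem parse_bcd_rev_fold (l : List Int) (s p : Int) :
    (l.reverse.foldl (fun (tw : Int × Int) (d : Int) => (tw.1 + d * tw.2, tw.2 * 10)) (s, p)).1
      = s + parse_bcd_horner l * p := by
  induction l using List.reverseRecOn generalizing s p with
  | nil => simp [parse_bcd_horner]
  | append_singleton t d ih =>
    simp only [List.reverse_append, List.reverse_cons, List.reverse_nil, List.nil_append,
      List.singleton_append, List.foldl_cons]
    rw [ih (s + d * p) (p * 10)]
    have h2 : parse_bcd_horner (t ++ [d]) = parse_bcd_horner t * 10 + d := by
      unfold parse_bcd_horner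
      rw [List.foldl_append, List.foldl_cons, List.foldl_nil, parse_bcd_horner_shift]
    rw [h2]
    ring

-- ===== VERDICT (by name: the statement is the Claim_ definition above) =====
theorem parse_bcd_spec : Claim_equal_parse_bcd := by
  intro data _
  show parse_bcd data = parse_bcd_alt data
  rw [parse_bcd_eq_horner, parse_bcd_alt]
  rw [parse_bcd_rev_fold]
  ring
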